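-- pv_equiv track=rewrite | github.com/paiml/depyler | examples/hard_number_spell.py | number_to_digit_words
-- ===== SOURCE A (Python) =====
-- def digit_to_word(d: int) -> str:
--     """Convert single digit 0-9 to English word."""
--     if d == 0:
--         return "zero"
--     if d == 1:
--         return "one"
--     if d == 2:
--         return "two"
--     if d == 3:
--         return "three"
--     if d == 4:
--         return "four"
--     if d == 5:
--         return "five"
--     if d == 6:
--         return "six"
--     if d == 7:
--         return "seven"
--     if d == 8:
--         return "eight"
--     if d == 9:
--         return "nine"
--     return "unknown"
--
-- def number_to_digit_words(n: int) -> str: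
--     """Convert number to space-separated digit words."""
--     if n == 0:
--         return "zero"
--     val: int = n
--     if val < 0:
--         val = -val
--     digits: list[int] = []
--     while val > 0:
--         digits.append(val % 10)
--         val = val // 10
--     result: str = ""
--     i: int = len(digits) - 1
--     while i >= 0:
--         if i < len(digits) - 1:
--             result = result + " "
--         result = result + digit_to_word(digits[i])
--         i = i - 1
--     return result
-- ===== SOURCE B (Python) =====
-- def digit_to_word(d: int) -> str:
--     """Convert single digit 0-9 to English word."""
--     if d == 0:
--         return "zero"
--     if d == 1:
--         return "one"
--     if d == 2:
--         return "two"
--     if d == 3: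
--         return "three"
--     if d == 4:
--         return "four"
--     if d == 5:
--         return "five"
--     if d == 6:
--         return "six"
--     if d == 7:
--         return "seven"
--     if d == 8:
--         return "eight"
--     if d == 9:
--         return "nine"
--     return "unknown"
--
-- def number_to_digit_words(n: int) -> str:
--     """Convert number to space-separated digit words."""
--     return " ".join(digit_to_word(ord(c) - 48) for c in str(abs(n)))
-- ===== Notes on version B (the rewrite author's own statement) =====
-- stated objective: idiomatic
-- what changed: Replaces the mod/div digit-extraction loop, the digits list and the backwards index walk with str(abs(n)) (already most-significant-first) and a single ' '.join over its characters.
import Mathlib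
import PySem

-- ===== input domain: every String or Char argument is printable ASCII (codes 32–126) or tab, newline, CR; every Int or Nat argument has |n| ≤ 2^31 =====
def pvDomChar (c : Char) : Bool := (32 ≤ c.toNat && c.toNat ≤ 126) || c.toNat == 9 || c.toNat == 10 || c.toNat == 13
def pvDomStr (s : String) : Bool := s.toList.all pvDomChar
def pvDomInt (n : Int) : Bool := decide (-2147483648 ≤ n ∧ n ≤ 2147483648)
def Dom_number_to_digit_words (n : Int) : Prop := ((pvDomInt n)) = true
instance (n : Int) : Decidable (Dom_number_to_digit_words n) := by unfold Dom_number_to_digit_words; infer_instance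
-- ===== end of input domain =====

-- B replaces the mod/div digit-extraction loop, the digits list and the backwards index walk
-- by str(abs(n)) (already most-significant-first) and a single ' '.join over its characters (idiomatic).


-- ===== PORT A =====
-- shared helper: digit_to_word, the chain of ifs
def digit_to_word (d : Int) : String :=
  if d = 0 then "zero"
  else if d = 1 then "one"
  else if d = 2 then "two"
  else if d = 3 then "three"
  else if d = 4 then "four"
  else if d = 5 then "five"
  else if d = 6 then "six"
  else if d = 7 then "seven"
  else if d = 8 then "eight"
  else if d = 9 then "nine"
  else "unknown"

-- the 'while val > 0: digits.append(val % 10); val = val // 10' loop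
def pvDigitsLoop (val : Int) (digits : List Int) : List Int :=
  if 0 < val then
    pvDigitsLoop (PySem.Int.floordiv val 10) (digits ++ [PySem.Int.mod val 10])
  else digits
  termination_by val.toNat
  decreasing_by rw [PySem.Int.floordiv_eq_ediv_of_pos (by omega)]; omega

-- the 'while i >= 0' result-building loop; digits[i] is always in range here, so pyGetD is exact
def pvSpellLoop (digits : List Int) (i : Int) (result : String) : String :=
  if 0 ≤ i then
    pvSpellLoop digits (i - 1)
      ((if i < PySem.List.len digits - 1 then result ++ " " else result) ++
        digit_to_word (PySem.List.pyGetD digits i 0))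
  else result
  termination_by (i + 1).toNat
  decreasing_by omega

def number_to_digit_words (n : Int) : String :=
  if n = 0 then "zero"
  else
    let val := if n < 0 then -n else n
    let digits := pvDigitsLoop val []
    pvSpellLoop digits (PySem.List.len digits - 1) ""

-- ===== PORT B =====
-- B: ' '.join(digit_to_word(ord(c) - 48) for c in str(abs(n)))
def number_to_digit_words_alt (n : Int) : String :=
  PySem.Str.join " "
    ((PySem.Int.toChars |n|).map (fun c => digit_to_word ((c.toNat : Int) - 48)))

-- ===== PRECONDITION & SPEC =====
def Spec_number_to_digit_words (n : Int) (out : String) : Prop := out = number_to_digit_words_alt n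
instance (n : Int) (out : String) : Decidable (Spec_number_to_digit_words n out) := by unfold Spec_number_to_digit_words; infer_instance

-- ===== CLAIM (what is proved, stated in full; the proofs are below) =====
def Claim_equal_number_to_digit_words : Prop := ∀ (n : Int), Dom_number_to_digit_words n → Spec_number_to_digit_words n (number_to_digit_words n)

-- ===== LEMMAS AND PROOFS =====

-- little-endian decimal digits of a natural number (proof-side spec shared by both ports)
def pvDigLE (m : Nat) : List Nat :=
  if h : m = 0 then [] else m % 10 :: pvDigLE (m / 10)
  termination_by m
  decreasing_by exact Nat.div_lt_self (Nat.pos_of_ne_zero h) (by omega)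

lemma pvDigLE_lt (m : Nat) : ∀ d ∈ pvDigLE m, d < 10 := by
  induction m using Nat.strong_induction_on with
  | _ m ih =>
    rw [pvDigLE]
    split
    · simp
    · rename_i h
      intro d hd
      rcases List.mem_cons.mp hd with rfl | hd
      · omega
      · exact ih (m / 10) (Nat.div_lt_self (Nat.pos_of_ne_zero h) (by omega)) d hd

lemma pvDigLE_ne_nil (m : Nat) (h : 0 < m) : pvDigLE m ≠ [] := by
  rw [pvDigLE]; simp [Nat.pos_iff_ne_zero.mp h]

lemma pvDigitsLoop_acc : ∀ (k : Nat) (val : Int) (digits : List Int), val.toNat ≤ k →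
    pvDigitsLoop val digits = digits ++ pvDigitsLoop val [] := by
  intro k
  induction k with
  | zero =>
    intro val digits hk
    rw [pvDigitsLoop]
    conv_rhs => rw [pvDigitsLoop]
    simp [show ¬ 0 < val by omega]
  | succ k ih =>
    intro val digits hk
    by_cases hv : 0 < val
    · have hd : (PySem.Int.floordiv val 10).toNat ≤ k := by
        rw [PySem.Int.floordiv_eq_ediv_of_pos (by omega)]; omega
      rw [pvDigitsLoop, if_pos hv, ih _ _ hd]
      conv_rhs => rw [pvDigitsLoop, if_pos hv, ih _ _ hd]
      simp
    · rw [pvDigitsLoop]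
      conv_rhs => rw [pvDigitsLoop]
      simp [hv]

lemma pvDigitsLoop_eq_digLE (m : Nat) : pvDigitsLoop (m : Int) [] = List.map (fun d : Nat => (d : Int)) (pvDigLE m) := by
  induction m using Nat.strong_induction_on with
  | _ m ih =>
    by_cases h : m = 0
    · subst h; rw [pvDigitsLoop, pvDigLE]; simp
    · have hm : 0 < (m : Int) := by omega
      have hfd : PySem.Int.floordiv (m : Int) 10 = ((m / 10 : Nat) : Int) := by
        exact_mod_cast PySem.Int.floordiv_natCast m 10
      have hmod : PySem.Int.mod (m : Int) 10 = ((m % 10 : Nat) : Int) := by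
        exact_mod_cast PySem.Int.mod_natCast m 10
      rw [pvDigitsLoop, if_pos hm, pvDigitsLoop_acc (PySem.Int.floordiv (m : Int) 10).toNat _ _ le_rfl]
      rw [hfd, hmod]
      rw [ih (m / 10) (Nat.div_lt_self (Nat.pos_of_ne_zero h) (by omega))]
      conv_rhs => rw [pvDigLE]
      simp [h]

lemma pvSpellLoop_acc : ∀ (k : Nat) (ds : List Int) (i : Int) (res : String), (i + 1).toNat ≤ k →
    pvSpellLoop ds i res = res ++ pvSpellLoop ds i "" := by
  intro k
  induction k with
  | zero =>
    intro ds i res hk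
    rw [pvSpellLoop]
    conv_rhs => rw [pvSpellLoop]
    simp [show ¬ 0 ≤ i by omega]
  | succ k ih =>
    intro ds i res hk
    by_cases hi : 0 ≤ i
    · have hd : (i - 1 + 1).toNat ≤ k := by omega
      rw [pvSpellLoop, if_pos hi, ih _ _ _ hd]
      conv_rhs => rw [pvSpellLoop, if_pos hi, ih _ _ _ hd]
      split_ifs <;> simp [String.append_assoc]
    · rw [pvSpellLoop]
      conv_rhs => rw [pvSpellLoop]
      simp [hi]

lemma str_join_cons_cons (p q : String) (rest : List String) :
    PySem.Str.join " " (p :: q :: rest) = p ++ " " ++ PySem.Str.join " " (q :: rest) :=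
  String.ext (by simp [PySem.Str.toList_join, PySem.Chars.join_cons_cons])

lemma str_join_singleton (p : String) : PySem.Str.join " " [p] = p :=
  String.ext (by simp [PySem.Str.toList_join, PySem.Chars.join_singleton])

lemma pvSpellLoop_spec (ds : List Int) : ∀ (k : Nat), k < ds.length →
    pvSpellLoop ds (k : Int) "" =
      (if (k : Int) < PySem.List.len ds - 1 then " " else "") ++
        PySem.Str.join " " (((ds.take (k + 1)).reverse).map digit_to_word) := by
  intro k
  induction k with
  | zero =>
    intro hk
    rw [pvSpellLoop, if_pos (by positivity)]
    rw [show ((0 : Nat) : Int) - 1 = -1 by norm_num, pvSpellLoop, if_neg (by norm_num)]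
    rcases ds with _ | ⟨d, t⟩
    · simp at hk
    · simp [str_join_singleton, PySem.List.pyGetD_zero_cons]
  | succ k ih =>
    intro hk
    have hk' : k < ds.length := by omega
    rw [pvSpellLoop, if_pos (by positivity)]
    push_cast
    rw [show ((k : Int) + 1) - 1 = (k : Int) by ring]
    rw [pvSpellLoop_acc ((k : Int) + 1).toNat ds (k : Int) _ le_rfl, ih hk']
    have hsep : (k : Int) < PySem.List.len ds - 1 := by rw [PySem.List.len_eq]; omega
    rw [if_pos hsep]
    have hget : PySem.List.pyGetD ds ((k : Int) + 1) 0 = ds[k + 1] := by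
      rw [show ((k : Int) + 1) = ((k + 1 : Nat) : Int) by push_cast; ring,
        PySem.List.pyGetD_natCast, List.getD_eq_getElem?_getD, List.getElem?_eq_getElem hk]
      rfl
    have htake : ds.take (k + 1 + 1) = ds.take (k + 1) ++ [ds[k + 1]] := by
      rw [List.take_add_one, List.getElem?_eq_getElem hk]; rfl
    have hne : ((ds.take (k + 1)).reverse).map digit_to_word ≠ [] := by
      have htl : (ds.take (k + 1)).length = k + 1 := by rw [List.length_take]; omega
      intro hcon
      rw [← List.length_eq_zero_iff] at hcon
      rw [List.length_map, List.length_reverse, htl] at hcon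
      omega
    rw [htake, hget]
    rcases hl : ((ds.take (k + 1)).reverse).map digit_to_word with _ | ⟨p, rest⟩
    · exact absurd hl hne
    · simp only [List.reverse_append, List.reverse_cons, List.reverse_nil, List.nil_append,
        List.cons_append, List.map_cons, hl, str_join_cons_cons]
      simp [String.append_assoc]

lemma toDigitsCore_eq : ∀ (f : Nat), ∀ (m : Nat) (acc : List Char), m < f → 0 < m →
    Nat.toDigitsCore 10 f m acc = (pvDigLE m).reverse.map Nat.digitChar ++ acc := by
  intro f
  induction f with
  | zero => intro m acc h; omega
  | succ f ih =>
    intro m acc hm hpos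
    rw [Nat.toDigitsCore]
    by_cases h10 : m / 10 = 0
    · simp only [h10]
      rw [pvDigLE, dif_neg (by omega), h10, pvDigLE]
      simp
    · simp only [h10]
      rw [ih (m / 10) _ (by omega) (Nat.pos_of_ne_zero h10)]
      conv_rhs => rw [pvDigLE]
      simp [show ¬ m = 0 by omega]

lemma word_digitChar (d : Nat) (h : d < 10) :
    digit_to_word (((Nat.digitChar d).toNat : Int) - 48) = digit_to_word (d : Int) := by
  interval_cases d <;> rfl

theorem number_to_digit_words_spec : Claim_equal_number_to_digit_words := by
  intro n _
  unfold Spec_number_to_digit_words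
  by_cases hz : n = 0
  · subst hz; decide
  · have hm : 0 < n.natAbs := by omega
    have hval : (if n < 0 then -n else n) = (n.natAbs : Int) := by
      split_ifs with h <;> omega
    have hds : pvDigitsLoop (if n < 0 then -n else n) [] =
        List.map (fun d : Nat => (d : Int)) (pvDigLE n.natAbs) := by
      rw [hval, pvDigitsLoop_eq_digLE]
    have hnil : pvDigLE n.natAbs ≠ [] := pvDigLE_ne_nil n.natAbs hm
    have hlen : 0 < (List.map (fun d : Nat => (d : Int)) (pvDigLE n.natAbs)).length := by
      simp [List.length_pos_iff, hnil]
    -- the A side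
    have hA : number_to_digit_words n =
        PySem.Str.join " "
          (((List.map (fun d : Nat => (d : Int)) (pvDigLE n.natAbs)).reverse).map digit_to_word) := by
      rw [number_to_digit_words, if_neg hz]
      simp only [hds]
      have hcast : PySem.List.len (List.map (fun d : Nat => (d : Int)) (pvDigLE n.natAbs)) - 1 =
          (((List.map (fun d : Nat => (d : Int)) (pvDigLE n.natAbs)).length - 1 : Nat) : Int) := by
        rw [PySem.List.len_eq]; omega
      rw [hcast, pvSpellLoop_spec _ _ (by omega)]
      rw [if_neg (by rw [PySem.List.len_eq]; omega)]
      rw [show (List.map (fun d : Nat => (d : Int)) (pvDigLE n.natAbs)).length - 1 + 1 =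
        (List.map (fun d : Nat => (d : Int)) (pvDigLE n.natAbs)).length by omega, List.take_length]
      exact String.empty_append
    -- the B side
    have habs : |n| = (n.natAbs : Int) := Int.abs_eq_natAbs n
    have hchars : PySem.Int.toChars |n| = List.map Nat.digitChar (pvDigLE n.natAbs).reverse := by
      rw [habs, PySem.Int.toChars, if_neg (by omega), Int.toNat_natCast, Nat.toDigits,
        toDigitsCore_eq (n.natAbs + 1) n.natAbs [] (by omega) hm, List.append_nil]
    rw [hA, number_to_digit_words_alt, hchars]
    rw [List.map_reverse, List.map_map, List.map_map, List.map_reverse]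
    congr 2
    apply List.map_congr_left
    intro d hd
    simp only [Function.comp]
    exact (word_digitChar d (pvDigLE_lt n.natAbs d hd)).symm
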